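-- pv_equiv track=rewrite | github.com/AIxlab-D3-NSBE-NMS/orchestra_analysis | demos/emot_qt_realtime.py | get_emotion_plot_names
-- ===== SOURCE A (Python) =====
-- EMOTION_ORDER = ["angry", "disgust", "fear", "happy", "sad", "surprise", "neutral"]
--
-- def get_emotion_plot_names(history, current_distribution=None):
--     emotion_names = set()
--     if current_distribution:
--         emotion_names.update(current_distribution.keys())
--     for _, sample in history:
--         emotion_names.update(sample.keys())
--
--     ordered_names = [emotion for emotion in EMOTION_ORDER if emotion in emotion_names]
--     ordered_names.extend(sorted(emotion_names - set(ordered_names)))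
--     return ordered_names or EMOTION_ORDER
-- ===== SOURCE B (Python) =====
-- EMOTION_ORDER = ["angry", "disgust", "fear", "happy", "sad", "surprise", "neutral"]
--
-- def get_emotion_plot_names(history, current_distribution=None):
--     names = set(current_distribution or ())
--     names |= {k for _, sample in history for k in sample}
--     rank = {e: i for i, e in enumerate(EMOTION_ORDER)}
--     result = sorted(names, key=lambda e: (rank.get(e, len(EMOTION_ORDER)), e))
--     return result or list(EMOTION_ORDER)
-- ===== Notes on version B (the rewrite author's own statement) =====
-- stated objective: idiomatic
-- what changed: A orders the names by filtering the preset list and appending the sorted leftovers of a set difference; B replaces that two-phase ordering with a single keyed sort over the gathered set using a rank dict (preset rank, then name), and gathers history keys with a set comprehension instead of an update loop.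
import Mathlib
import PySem

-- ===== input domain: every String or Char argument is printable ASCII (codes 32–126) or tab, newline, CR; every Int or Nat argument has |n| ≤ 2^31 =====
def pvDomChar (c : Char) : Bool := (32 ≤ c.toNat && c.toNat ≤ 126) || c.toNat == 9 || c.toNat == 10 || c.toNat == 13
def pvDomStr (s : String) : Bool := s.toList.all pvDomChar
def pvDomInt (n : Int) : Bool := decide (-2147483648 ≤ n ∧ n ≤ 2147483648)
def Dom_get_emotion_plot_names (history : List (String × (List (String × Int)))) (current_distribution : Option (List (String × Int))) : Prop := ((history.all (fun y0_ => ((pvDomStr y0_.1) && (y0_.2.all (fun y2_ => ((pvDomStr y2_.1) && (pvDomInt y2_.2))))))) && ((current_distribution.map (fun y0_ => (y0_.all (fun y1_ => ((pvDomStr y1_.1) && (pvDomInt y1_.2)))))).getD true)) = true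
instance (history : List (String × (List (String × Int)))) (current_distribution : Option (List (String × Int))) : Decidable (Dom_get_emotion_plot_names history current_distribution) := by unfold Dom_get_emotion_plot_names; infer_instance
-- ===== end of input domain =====

-- B replaces A's two-phase ordering (filter the preset list, append the sorted set difference)
-- by a single keyed sort with a rank dict: objective 'idiomatic', same value on every input.

def EMOTION_ORDER : List String := ["angry", "disgust", "fear", "happy", "sad", "surprise", "neutral"]

-- ===== PORT A =====
def get_emotion_plot_names (history : List (String × (List (String × Int)))) (current_distribution : Option (List (String × Int))) : List String :=
  -- emotion_names = set(); if current_distribution: emotion_names.update(current_distribution.keys())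
  let s0 : PySem.Set String := PySem.Set.empty
  let s1 : PySem.Set String :=
    match current_distribution with
    | some d => if d.isEmpty then s0 else PySem.Set.update s0 ((PySem.Dict.mk d).keys)
    | none => s0
  -- for _, sample in history: emotion_names.update(sample.keys())
  let emotion_names : PySem.Set String :=
    history.foldl (fun s p => PySem.Set.update s ((PySem.Dict.mk p.2).keys)) s1
  -- ordered_names = [emotion for emotion in EMOTION_ORDER if emotion in emotion_names]
  let ordered_names : List String := EMOTION_ORDER.filter (fun e => PySem.Set.contains emotion_names e)
  -- ordered_names.extend(sorted(emotion_names - set(ordered_names)))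
  let ordered_names : List String :=
    ordered_names ++ PySem.List.sorted (PySem.Set.diff emotion_names (PySem.Set.ofList ordered_names)) (fun x => x)
  -- return ordered_names or EMOTION_ORDER
  if ordered_names = [] then EMOTION_ORDER else ordered_names

-- ===== PORT B =====
def get_emotion_plot_names_alt (history : List (String × (List (String × Int)))) (current_distribution : Option (List (String × Int))) : List String :=
  -- names = set(current_distribution or ())   (iterating a dict yields its keys; 'or ()' on an empty dict adds nothing, same as getD [])
  let names : PySem.Set String := PySem.Set.ofList ((PySem.Dict.mk (current_distribution.getD [])).keys)
  -- names |= {k for _, sample in history for k in sample}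
  let names : PySem.Set String := PySem.Set.union names (PySem.Set.ofList (history.flatMap (fun p => (PySem.Dict.mk p.2).keys)))
  -- rank = {e: i for i, e in enumerate(EMOTION_ORDER)}
  let rank : PySem.Dict String Int := (PySem.List.enumerate EMOTION_ORDER).foldl (fun d p => PySem.Dict.insert d p.2 p.1) PySem.Dict.empty
  -- result = sorted(names, key=lambda e: (rank.get(e, len(EMOTION_ORDER)), e))   (tuple key = lexicographic pair)
  let result : List String := PySem.List.sorted names (fun e => toLex ((PySem.Dict.getD rank e (EMOTION_ORDER.length : Int)), e))
  -- return result or list(EMOTION_ORDER)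
  if result = [] then EMOTION_ORDER else result

-- ===== PRECONDITION & SPEC =====
def Spec_get_emotion_plot_names (history : List (String × (List (String × Int)))) (current_distribution : Option (List (String × Int))) (out : List String) : Prop := out = get_emotion_plot_names_alt history current_distribution
instance (history : List (String × (List (String × Int)))) (current_distribution : Option (List (String × Int))) (out : List String) : Decidable (Spec_get_emotion_plot_names history current_distribution out) := by unfold Spec_get_emotion_plot_names; infer_instance

-- ===== CLAIM (what is proved, stated in full; the proofs are below) =====
def Claim_equal_get_emotion_plot_names : Prop := ∀ (history : List (String × (List (String × Int)))) (current_distribution : Option (List (String × Int))), Dom_get_emotion_plot_names history current_distribution → Spec_get_emotion_plot_names history current_distribution (get_emotion_plot_names history current_distribution)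

-- ===== LEMMAS AND PROOFS =====

-- B's rank dict and sort key, named for the proofs
def pvRank : PySem.Dict String Int := (PySem.List.enumerate EMOTION_ORDER).foldl (fun d p => PySem.Dict.insert d p.2 p.1) PySem.Dict.empty
def pvRnk (e : String) : Int := PySem.Dict.getD pvRank e (EMOTION_ORDER.length : Int)
def pvKey (e : String) : Lex (Int × String) := toLex (pvRnk e, e)

theorem pvRnk_lt_of_mem (e : String) (h : e ∈ EMOTION_ORDER) : pvRnk e < 7 := by
  fin_cases h <;> decide

theorem pvRnk_eq_of_not_mem (e : String) (h : e ∉ EMOTION_ORDER) : pvRnk e = 7 := by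
  have hk : PySem.Dict.keys pvRank = EMOTION_ORDER := by decide
  have hnone : PySem.Dict.get? pvRank e = none := by
    rw [PySem.Dict.get?_eq_none_iff_not_mem_keys, hk]; exact h
  simp [pvRnk, PySem.Dict.getD, hnone, EMOTION_ORDER]

theorem pairwise_rnk_EO : List.Pairwise (fun a b => pvRnk a < pvRnk b) EMOTION_ORDER := by decide

-- membership and nodup of the foldl of updates (A's history loop)
theorem mem_foldl_update {α β : Type} [BEq α] [LawfulBEq α] (l : List β) (f : β → List α) (s : PySem.Set α) (y : α) :
    y ∈ l.foldl (fun s p => PySem.Set.update s (f p)) s ↔ y ∈ s ∨ ∃ p ∈ l, y ∈ f p := by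
  induction l generalizing s with
  | nil => simp
  | cons x xs ih => simp [ih, PySem.Set.mem_update, or_assoc]

theorem nodup_foldl_update {α β : Type} [BEq α] [LawfulBEq α] (l : List β) (f : β → List α) (s : PySem.Set α) (h : s.Nodup) :
    (l.foldl (fun s p => PySem.Set.update s (f p)) s).Nodup := by
  induction l generalizing s with
  | nil => exact h
  | cons x xs ih => exact ih _ (PySem.Set.nodup_update _ _ h)

-- the heart: A's two-phase ordering equals B's keyed sort, for any two nodup lists with the same members
theorem two_phase_eq_keyed_sort (S T : List String) (hS : S.Nodup) (hT : T.Nodup)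
    (hmem : ∀ x, x ∈ S ↔ x ∈ T) :
    EMOTION_ORDER.filter (fun e => PySem.Set.contains S e)
      ++ PySem.List.sorted (PySem.Set.diff S (PySem.Set.ofList (EMOTION_ORDER.filter (fun e => PySem.Set.contains S e)))) (fun x => x)
    = PySem.List.sorted T pvKey := by
  set ordered := EMOTION_ORDER.filter (fun e => PySem.Set.contains S e) with hord
  set tail := PySem.List.sorted (PySem.Set.diff S (PySem.Set.ofList ordered)) (fun x => x) with htail
  have hmem_ordered : ∀ x, x ∈ ordered ↔ x ∈ EMOTION_ORDER ∧ x ∈ S := by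
    intro x; simp [hord, List.mem_filter]
  have hmem_tail : ∀ x, x ∈ tail ↔ x ∈ S ∧ x ∉ ordered := by
    intro x
    rw [htail, PySem.List.mem_sorted]
    simp [PySem.Set.diff, List.mem_filter, PySem.Set.mem_ofList]
  have hnd_ordered : ordered.Nodup := by
    have h : EMOTION_ORDER.Nodup := by decide
    exact h.filter _
  have hnd_diff : (PySem.Set.diff S (PySem.Set.ofList ordered)).Nodup := PySem.Set.nodup_diff _ _ hS
  have hnd_tail : tail.Nodup := ((PySem.List.sorted_perm _ _ _).nodup_iff).mpr hnd_diff
  have hnd : (ordered ++ tail).Nodup :=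
    List.Nodup.append hnd_ordered hnd_tail (fun x hx hx' => ((hmem_tail x).mp hx').2 hx)
  have hmem_app : ∀ x, x ∈ ordered ++ tail ↔ x ∈ S := by
    intro x
    rw [List.mem_append, hmem_ordered, hmem_tail]
    constructor
    · rintro (⟨_, h⟩ | ⟨h, _⟩) <;> exact h
    · intro hxS
      by_cases hE : x ∈ EMOTION_ORDER
      · exact Or.inl ⟨hE, hxS⟩
      · exact Or.inr ⟨hxS, fun hxo => hE ((hmem_ordered x).mp hxo).1⟩
  have hperm : (ordered ++ tail).Perm T := by
    rw [List.perm_ext_iff_of_nodup hnd hT]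
    intro x; rw [hmem_app, hmem]
  have hnotEO_tail : ∀ x ∈ tail, x ∉ EMOTION_ORDER := by
    intro x hx hE
    have h' := (hmem_tail x).mp hx
    exact h'.2 ((hmem_ordered x).mpr ⟨hE, h'.1⟩)
  have hpw : List.Pairwise (fun a b => pvKey a < pvKey b) (ordered ++ tail) := by
    rw [List.pairwise_append]
    refine ⟨?_, ?_, ?_⟩
    · -- within ordered: strictly increasing rank
      have h := (pairwise_rnk_EO.filter (fun e => PySem.Set.contains S e))
      exact h.imp (fun h => by
        rw [pvKey, pvKey, Prod.Lex.toLex_lt_toLex]; exact Or.inl h)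
    · -- within tail: equal rank 7, strictly increasing name
      have hle : List.Pairwise (fun a b : String => a ≤ b) tail := by
        have h := PySem.List.sorted_pairwise (PySem.Set.diff S (PySem.Set.ofList ordered)) (fun x => x)
        rw [← htail] at h; exact h
      have hlt : List.Pairwise (fun a b : String => a < b) tail :=
        (hle.and hnd_tail).imp (fun h => lt_of_le_of_ne h.1 h.2)
      refine List.Pairwise.imp_of_mem ?_ hlt
      intro a b ha hb hab
      rw [pvKey, pvKey, Prod.Lex.toLex_lt_toLex,
        pvRnk_eq_of_not_mem a (hnotEO_tail a ha), pvRnk_eq_of_not_mem b (hnotEO_tail b hb)]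
      exact Or.inr ⟨rfl, hab⟩
    · -- across: rank < 7 vs rank = 7
      intro a ha b hb
      rw [pvKey, pvKey, Prod.Lex.toLex_lt_toLex, pvRnk_eq_of_not_mem b (hnotEO_tail b hb)]
      exact Or.inl (pvRnk_lt_of_mem a ((hmem_ordered a).mp ha).1)
  exact (PySem.List.sorted_eq_of_perm_of_pairwise_lt T (ordered ++ tail) pvKey hperm hpw).symm

-- both ports, given any seed set s1 for A and seed key list ks for B with the same members
theorem ports_core (history : List (String × (List (String × Int)))) (s1 : PySem.Set String) (ks : List String)
    (hnd : s1.Nodup) (hm : ∀ x, x ∈ s1 ↔ x ∈ ks) :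
    (let S := history.foldl (fun s p => PySem.Set.update s ((PySem.Dict.mk p.2).keys)) s1
     let ordered := EMOTION_ORDER.filter (fun e => PySem.Set.contains S e)
     let res := ordered ++ PySem.List.sorted (PySem.Set.diff S (PySem.Set.ofList ordered)) (fun x => x)
     if res = [] then EMOTION_ORDER else res)
    = (let T := PySem.Set.union (PySem.Set.ofList ks) (PySem.Set.ofList (history.flatMap (fun p => (PySem.Dict.mk p.2).keys)))
       let result := PySem.List.sorted T pvKey
       if result = [] then EMOTION_ORDER else result) := by
  set S := history.foldl (fun s p => PySem.Set.update s ((PySem.Dict.mk p.2).keys)) s1 with hSdef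
  set T := PySem.Set.union (PySem.Set.ofList ks) (PySem.Set.ofList (history.flatMap (fun p => (PySem.Dict.mk p.2).keys))) with hTdef
  have hS_nodup : S.Nodup := nodup_foldl_update _ _ _ hnd
  have hT_nodup : T.Nodup := PySem.Set.nodup_union _ _ (PySem.Set.nodup_ofList _)
  have hmem : ∀ x, x ∈ S ↔ x ∈ T := by
    intro x
    rw [hSdef, hTdef, mem_foldl_update, hm, PySem.Set.mem_union, PySem.Set.mem_ofList,
      PySem.Set.mem_ofList, List.mem_flatMap]
  have hmain := two_phase_eq_keyed_sort S T hS_nodup hT_nodup hmem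
  simp only [hmain]

-- ===== VERDICT (by name: the statement is the Claim_ definition above) =====
theorem get_emotion_plot_names_spec : Claim_equal_get_emotion_plot_names := by
  intro history cd _
  show get_emotion_plot_names history cd = get_emotion_plot_names_alt history cd
  cases cd with
  | none =>
    exact ports_core history PySem.Set.empty ((PySem.Dict.mk ([] : List (String × Int))).keys)
      List.nodup_nil (by intro x; simp [PySem.Set.empty, PySem.Dict.keys])
  | some d =>
    cases d with
    | nil =>
      exact ports_core history PySem.Set.empty ((PySem.Dict.mk ([] : List (String × Int))).keys)
        List.nodup_nil (by intro x; simp [PySem.Set.empty, PySem.Dict.keys])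
    | cons p rest =>
      exact ports_core history (PySem.Set.update PySem.Set.empty ((PySem.Dict.mk (p :: rest)).keys)) ((PySem.Dict.mk (p :: rest)).keys)
        (PySem.Set.nodup_update _ _ List.nodup_nil)
        (by intro x; simp [PySem.Set.mem_update, PySem.Set.empty])
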